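-- pv_equiv track=rewrite | github.com/dygy/MIDI-grep | scripts/python/thin_patterns.py | count_drum_hits
-- ===== SOURCE A (Python) =====
-- from typing import List, Dict, Tuple
--
-- def count_drum_hits(bar: str) -> Dict[str, int]:
--     """Count drum hits in a bar pattern."""
--     counts = {'bd': 0, 'sd': 0, 'hh': 0, 'oh': 0, 'cp': 0}
--
--     # Expand ~*N notation
--     tokens = []
--     for token in bar.split():
--         if token.startswith('~*'):
--             try:
--                 count = int(token[2:])
--                 tokens.extend(['~'] * count)
--             except ValueError:
--                 tokens.append(token)
--         else:
--             tokens.append(token)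
--
--     for token in tokens:
--         # Handle chords [a,b]
--         if token.startswith('[') and token.endswith(']'):
--             notes = token[1:-1].split(',')
--             for note in notes:
--                 note = note.strip().lower()
--                 if note in counts:
--                     counts[note] += 1
--         else:
--             token_lower = token.lower()
--             if token_lower in counts:
--                 counts[token_lower] += 1
--
--     return counts
-- ===== SOURCE B (Python) =====
-- from collections import Counter
--
--
-- def count_drum_hits(bar: str):
--     """Count drum hits in a bar pattern (flatten-then-tally)."""
--     notes = []
--     for token in bar.split():
--         if token.startswith('[') and token.endswith(']'):
--             notes.extend(p.strip().lower() for p in token[1:-1].split(','))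
--         else:
--             notes.append(token.lower())
--     tally = Counter(notes)
--     return {k: tally[k] for k in ('bd', 'sd', 'hh', 'oh', 'cp')}
-- ===== Notes on version B (the rewrite author's own statement) =====
-- stated objective: simpler
-- what changed: B drops A's repeat-expansion pre-pass (the expanded rest tokens can never match a drum key), normalizes every token into a flat list of candidate notes in one pass, tallies them with collections.Counter, and projects the five fixed keys from the tally; A instead builds an expanded token list and counts by guarded in-place increments on a preset dict.
import Mathlib
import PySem

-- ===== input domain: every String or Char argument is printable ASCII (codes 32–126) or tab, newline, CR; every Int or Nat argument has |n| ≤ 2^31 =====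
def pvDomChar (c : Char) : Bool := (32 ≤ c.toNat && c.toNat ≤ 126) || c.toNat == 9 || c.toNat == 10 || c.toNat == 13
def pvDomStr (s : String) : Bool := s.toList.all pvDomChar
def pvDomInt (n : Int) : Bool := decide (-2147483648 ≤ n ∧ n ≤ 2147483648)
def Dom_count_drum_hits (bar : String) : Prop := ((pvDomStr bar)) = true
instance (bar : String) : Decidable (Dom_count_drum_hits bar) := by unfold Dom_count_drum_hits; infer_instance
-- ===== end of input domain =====

-- B replaces A's preset-dict guarded counting (after a repeat-expansion pass that can only
-- produce uncounted rest tokens) by a single flatten-normalize pass, a Counter tally, and a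
-- projection of the five fixed keys; simpler, same result.

-- ===== PORT A =====
def count_drum_hits (bar : String) : List (String × Int) :=
  let counts : PySem.Dict String Int :=
    PySem.Dict.ofList [("bd", 0), ("sd", 0), ("hh", 0), ("oh", 0), ("cp", 0)]
  -- Expand ~*N notation
  let tokens : List String :=
    (PySem.Str.split₀ bar).foldl (fun tokens token =>
      if PySem.Str.startswith token "~*" then
        match PySem.Int.ofStr? (PySem.Str.slice token (some 2) none) with
        | some count => tokens ++ PySem.List.pyRepeat ["~"] count
        | none => tokens ++ [token]
      else
        tokens ++ [token]) []
  let counts := tokens.foldl (fun counts token =>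
    -- Handle chords [a,b]
    if PySem.Str.startswith token "[" && PySem.Str.endswith token "]" then
      ((PySem.Str.split? (PySem.Str.slice token (some 1) (some (-1))) ",").getD []).foldl
        (fun counts note =>
          let note := PySem.Str.lower (PySem.Str.strip note)
          if counts.contains note then counts.modify note 0 (· + 1) else counts)
        counts
    else
      let token_lower := PySem.Str.lower token
      if counts.contains token_lower then counts.modify token_lower 0 (· + 1)
      else counts) counts
  counts.items

-- ===== PORT B =====
def count_drum_hits_alt (bar : String) : List (String × Int) :=
  let notes : List String :=
    (PySem.Str.split₀ bar).foldl (fun notes token =>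
      if PySem.Str.startswith token "[" && PySem.Str.endswith token "]" then
        notes ++ ((PySem.Str.split? (PySem.Str.slice token (some 1) (some (-1))) ",").getD []).map
          (fun p => PySem.Str.lower (PySem.Str.strip p))
      else
        notes ++ [PySem.Str.lower token]) []
  let tally : PySem.Dict String Int := PySem.Dict.counter notes
  ["bd", "sd", "hh", "oh", "cp"].map (fun k => (k, tally.getD k 0))

-- ===== PRECONDITION & SPEC =====
def Spec_count_drum_hits (bar : String) (out : List (String × Int)) : Prop := out = count_drum_hits_alt bar
instance (bar : String) (out : List (String × Int)) : Decidable (Spec_count_drum_hits bar out) := by unfold Spec_count_drum_hits; infer_instance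

-- ===== CLAIM (what is proved, stated in full; the proofs are below) =====
def Claim_equal_count_drum_hits : Prop := ∀ (bar : String), Dom_count_drum_hits bar → Spec_count_drum_hits bar (count_drum_hits bar)

-- ===== LEMMAS AND PROOFS =====

-- the guarded increment step of A's counting loop
def pvG (d : PySem.Dict String Int) (note : String) : PySem.Dict String Int :=
  if d.contains note then d.modify note 0 (· + 1) else d

-- the candidate notes a token contributes
def pvNotes (token : String) : List String :=
  if PySem.Str.startswith token "[" && PySem.Str.endswith token "]" then
    ((PySem.Str.split? (PySem.Str.slice token (some 1) (some (-1))) ",").getD []).map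
      (fun p => PySem.Str.lower (PySem.Str.strip p))
  else [PySem.Str.lower token]

-- A's '~*N' expansion of one token
def pvExpand (token : String) : List String :=
  if PySem.Str.startswith token "~*" then
    match PySem.Int.ofStr? (PySem.Str.slice token (some 2) none) with
    | some count => PySem.List.pyRepeat ["~"] count
    | none => [token]
  else [token]

theorem pv_foldl_flatMap {α β γ : Type} (l : List α) (f : α → List β) (g : γ → β → γ) (init : γ) :
    (l.flatMap f).foldl g init = l.foldl (fun acc x => (f x).foldl g acc) init := by
  induction l generalizing init with
  | nil => rfl
  | cons x xs ih => simp [List.foldl_append, ih]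

theorem pv_keys_foldl_pvG (ns : List String) (d : PySem.Dict String Int) :
    (ns.foldl pvG d).keys = d.keys := by
  induction ns generalizing d with
  | nil => rfl
  | cons n ns ih =>
    simp only [List.foldl_cons, ih]
    unfold pvG
    split
    · rename_i h
      rw [PySem.Dict.keys_modify, PySem.Dict.keys_insert_of_contains _ _ h]
    · rfl

theorem pv_getD_foldl_pvG (ns : List String) (d : PySem.Dict String Int) (k : String)
    (hk : d.contains k = true) :
    (ns.foldl pvG d).getD k 0 = d.getD k 0 + (ns.count k : Int) := by
  induction ns generalizing d with
  | nil => simp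
  | cons n ns ih =>
    simp only [List.foldl_cons]
    by_cases hc : d.contains n = true
    · have hstep : pvG d n = d.modify n 0 (· + 1) := by simp [pvG, hc]
      rw [hstep, ih _ (by simp [PySem.Dict.contains_modify, hk]),
          PySem.Dict.getD_modify, List.count_cons]
      by_cases hkn : k = n
      · simp only [hkn, BEq.rfl, if_pos]
        push_cast
        ring
      · have hnk : ¬ n = k := fun hh => hkn hh.symm
        simp [hkn, hnk]
    · have hc' : d.contains n = false := by simpa using hc
      have hstep : pvG d n = d := by simp [pvG, hc']
      have hkn : k ≠ n := fun h => by rw [h] at hk; rw [hk] at hc'; cases hc'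
      have hnk : ¬ n = k := fun hh => hkn hh.symm
      rw [hstep, ih _ hk, List.count_cons]
      simp [hnk]

theorem pv_count_flatMap_congr {α : Type} (l : List α) (f g : α → List String) (k : String)
    (h : ∀ x ∈ l, (f x).count k = (g x).count k) :
    (l.flatMap f).count k = (l.flatMap g).count k := by
  induction l with
  | nil => rfl
  | cons x xs ih =>
    simp only [List.flatMap_cons, List.count_append]
    rw [h x (by simp), ih (fun y hy => h y (by simp [hy]))]

theorem pv_not_chord_of_tilde (t : String) (h : PySem.Str.startswith t "~*" = true) :
    PySem.Str.startswith t "[" = false := by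
  simp only [PySem.Str.startswith_eq] at h ⊢
  rw [PySem.Chars.startswith_iff] at h
  obtain ⟨r, hr⟩ := h
  rw [← Bool.not_eq_true, PySem.Chars.startswith_iff]
  intro ⟨r', hr'⟩
  rw [← hr, show ("~*" : String).toList = ['~', '*'] from by decide] at hr'
  rw [show ("[" : String).toList = ['['] from by decide] at hr'
  simp only [List.cons_append, List.nil_append, List.cons.injEq] at hr'
  exact absurd hr'.1 (by decide)

theorem pv_lower_tilde_head (t : String) (h : PySem.Str.startswith t "~*" = true) :
    ∃ r, (PySem.Str.lower t).toList = '~' :: r := by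
  simp only [PySem.Str.startswith_eq] at h
  rw [PySem.Chars.startswith_iff] at h
  obtain ⟨r, hr⟩ := h
  rw [PySem.Str.toList_lower, ← hr]
  exact ⟨'*' :: PySem.Chars.lower r, rfl⟩

theorem pv_count_replicate_tilde (n : Nat) (k : String) (hk : k ≠ "~") :
    ((List.replicate n "~").flatMap pvNotes).count k = 0 := by
  induction n with
  | zero => rfl
  | succ m ih =>
    have h1 : pvNotes "~" = ["~"] := by decide
    have h2 : ("~" : String) ≠ k := fun h => hk h.symm
    simp [List.replicate_succ, h1, ih, h2]

theorem pv_count_expand (t : String) (k : String)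
    (hk : k ∈ (["bd", "sd", "hh", "oh", "cp"] : List String)) :
    ((pvExpand t).flatMap pvNotes).count k = (pvNotes t).count k := by
  unfold pvExpand
  by_cases h : PySem.Str.startswith t "~*" = true
  · simp only [h, if_true]
    have hnc := pv_not_chord_of_tilde t h
    have hnotes : pvNotes t = [PySem.Str.lower t] := by
      unfold pvNotes
      rw [hnc]
      rfl
    have hne : PySem.Str.lower t ≠ k := by
      obtain ⟨r, hr⟩ := pv_lower_tilde_head t h
      intro he
      have hh : k.toList.head? = some '~' := by rw [← he, hr]; rfl
      fin_cases hk <;> exact absurd hh (by decide)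
    have hkt : k ≠ "~" := by fin_cases hk <;> decide
    cases hof : PySem.Int.ofStr? (PySem.Str.slice t (some 2) none) with
    | some c =>
      rw [hnotes]
      simp only [PySem.List.pyRepeat_singleton]
      rw [pv_count_replicate_tilde c.toNat k hkt]
      simp [hne]
    | none =>
      simp
  · rw [if_neg h]
    simp

-- ===== VERDICT (by name: the statement is the Claim_ definition above) =====
theorem count_drum_hits_spec : Claim_equal_count_drum_hits := by
  intro bar _
  unfold Spec_count_drum_hits count_drum_hits count_drum_hits_alt
  set d0 : PySem.Dict String Int :=
    PySem.Dict.ofList [("bd", 0), ("sd", 0), ("hh", 0), ("oh", 0), ("cp", 0)] with hd0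
  set ts := PySem.Str.split₀ bar with hts
  -- A's first loop builds the flatMap of pvExpand
  have h1 : (ts.foldl (fun tokens token =>
      if PySem.Str.startswith token "~*" then
        match PySem.Int.ofStr? (PySem.Str.slice token (some 2) none) with
        | some count => tokens ++ PySem.List.pyRepeat ["~"] count
        | none => tokens ++ [token]
      else tokens ++ [token]) []) = ts.flatMap pvExpand := by
    have hf : (fun (tokens : List String) token =>
        if PySem.Str.startswith token "~*" then
          match PySem.Int.ofStr? (PySem.Str.slice token (some 2) none) with
          | some count => tokens ++ PySem.List.pyRepeat ["~"] count
          | none => tokens ++ [token]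
        else tokens ++ [token]) = (fun acc t => acc ++ pvExpand t) := by
      funext acc t
      unfold pvExpand
      split
      · cases PySem.Int.ofStr? (PySem.Str.slice t (some 2) none) <;> rfl
      · rfl
    rw [hf, PySem.List.foldl_append_eq_flatMap]
    rfl
  -- A's second loop is a pvG-fold over the notes of each token
  have h2 : (fun (counts : PySem.Dict String Int) token =>
      if PySem.Str.startswith token "[" && PySem.Str.endswith token "]" then
        ((PySem.Str.split? (PySem.Str.slice token (some 1) (some (-1))) ",").getD []).foldl
          (fun counts note =>
            let note := PySem.Str.lower (PySem.Str.strip note)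
            if counts.contains note then counts.modify note 0 (· + 1) else counts)
          counts
      else
        let token_lower := PySem.Str.lower token
        if counts.contains token_lower then counts.modify token_lower 0 (· + 1)
        else counts) = (fun d t => (pvNotes t).foldl pvG d) := by
    funext d t
    unfold pvNotes pvG
    split
    · rw [List.foldl_map]
    · rfl
  -- B's loop builds the flatMap of pvNotes
  have h3 : (ts.foldl (fun notes token =>
      if PySem.Str.startswith token "[" && PySem.Str.endswith token "]" then
        notes ++ ((PySem.Str.split? (PySem.Str.slice token (some 1) (some (-1))) ",").getD []).map
          (fun p => PySem.Str.lower (PySem.Str.strip p))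
      else notes ++ [PySem.Str.lower token]) []) = ts.flatMap pvNotes := by
    have hf : (fun (notes : List String) token =>
        if PySem.Str.startswith token "[" && PySem.Str.endswith token "]" then
          notes ++ ((PySem.Str.split? (PySem.Str.slice token (some 1) (some (-1))) ",").getD []).map
            (fun p => PySem.Str.lower (PySem.Str.strip p))
        else notes ++ [PySem.Str.lower token]) = (fun acc t => acc ++ pvNotes t) := by
      funext acc t
      unfold pvNotes
      split <;> rfl
    rw [hf, PySem.List.foldl_append_eq_flatMap]
    rfl
  simp only [h1, h2, h3]
  rw [pv_foldl_flatMap (ts.flatMap pvExpand) pvNotes pvG d0 |>.symm]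
  set notesA := (ts.flatMap pvExpand).flatMap pvNotes with hna
  set notesB := ts.flatMap pvNotes with hnb
  have hkeys : (notesA.foldl pvG d0).keys = ["bd", "sd", "hh", "oh", "cp"] := by
    rw [pv_keys_foldl_pvG]; decide
  have hnd : (notesA.foldl pvG d0).keys.Nodup := by rw [hkeys]; decide
  rw [PySem.Dict.items_eq_map_keys _ hnd 0, hkeys]
  apply List.map_congr_left
  intro k hk
  have hcount : notesA.count k = notesB.count k := by
    rw [hna, List.flatMap_assoc]
    exact pv_count_flatMap_congr ts _ _ k (fun t _ => pv_count_expand t k hk)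
  have hcontains : d0.contains k = true := by fin_cases hk <;> decide
  have hzero : d0.getD k 0 = 0 := by fin_cases hk <;> decide
  rw [pv_getD_foldl_pvG _ _ _ hcontains, hzero, PySem.Dict.getD_counter, hcount]
  simp
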